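-- pv_equiv track=rewrite | github.com/zeeshan4002911/DSA-reloaded | 1.data-structure/3.hashing/easy/minimum-removal-for-no-common.py | remove_minimum_number_of_elements
-- ===== SOURCE A (Python) =====
-- def remove_minimum_number_of_elements(arr1, arr2):
--     freq_arr1 = {}
--     freq_arr2 = {}
--
--     for ele in arr1:
--         freq_arr1[ele] = freq_arr1.get(ele, 0) + 1
--     for ele in arr2:
--         freq_arr2[ele] = freq_arr2.get(ele, 0) + 1
--
--     result = 0
--     for ele in freq_arr1:
--         if ele in freq_arr2:
--             result += min(freq_arr1[ele], freq_arr2[ele])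
--     return result
-- ===== SOURCE B (Python) =====
-- def remove_minimum_number_of_elements(arr1, arr2):
--     budget = {}
--     for x in arr1:
--         budget[x] = budget.get(x, 0) + 1
--     result = 0
--     for x in arr2:
--         if budget.get(x, 0) > 0:
--             budget[x] -= 1
--             result += 1
--     return result
-- ===== Notes on version B (the rewrite author's own statement) =====
-- stated objective: simpler
-- what changed: Replaces the two frequency maps plus a min-over-keys summation with a single consuming pass over arr2 that decrements a budget map built from arr1 and counts each successful match.
import Mathlib
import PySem

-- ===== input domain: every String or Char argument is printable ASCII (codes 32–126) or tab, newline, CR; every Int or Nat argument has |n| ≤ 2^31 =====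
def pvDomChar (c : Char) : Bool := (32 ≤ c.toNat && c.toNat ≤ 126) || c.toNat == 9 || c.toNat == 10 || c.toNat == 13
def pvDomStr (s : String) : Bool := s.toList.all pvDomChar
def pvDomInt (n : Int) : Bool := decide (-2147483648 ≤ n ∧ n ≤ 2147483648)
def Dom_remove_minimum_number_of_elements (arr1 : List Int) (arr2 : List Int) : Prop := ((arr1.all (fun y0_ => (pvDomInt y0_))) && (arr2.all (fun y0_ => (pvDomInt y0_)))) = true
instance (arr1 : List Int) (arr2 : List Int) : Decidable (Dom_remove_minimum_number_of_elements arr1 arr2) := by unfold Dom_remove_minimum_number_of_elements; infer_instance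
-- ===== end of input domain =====

-- B replaces A's two frequency maps and min-over-keys summation by one consuming
-- pass over arr2 against a budget map of arr1 (objective: simpler decomposition).

-- ===== PORT A =====
def remove_minimum_number_of_elements (arr1 : List Int) (arr2 : List Int) : Int :=
  let freq_arr1 := arr1.foldl (fun d ele => d.insert ele (d.getD ele 0 + 1)) (PySem.Dict.empty : PySem.Dict Int Int)
  let freq_arr2 := arr2.foldl (fun d ele => d.insert ele (d.getD ele 0 + 1)) (PySem.Dict.empty : PySem.Dict Int Int)
  freq_arr1.keys.foldl
    (fun result ele =>
      if freq_arr2.contains ele then result + min (freq_arr1.getD ele 0) (freq_arr2.getD ele 0)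
      else result) 0

-- ===== PORT B =====
def remove_minimum_number_of_elements_alt (arr1 : List Int) (arr2 : List Int) : Int :=
  let budget := arr1.foldl (fun d x => d.insert x (d.getD x 0 + 1)) (PySem.Dict.empty : PySem.Dict Int Int)
  (arr2.foldl
    (fun (s : PySem.Dict Int Int × Int) x =>
      if s.1.getD x 0 > 0 then (s.1.insert x (s.1.getD x 0 - 1), s.2 + 1) else s)
    (budget, 0)).2

-- ===== PRECONDITION & SPEC =====
def Spec_remove_minimum_number_of_elements (arr1 : List Int) (arr2 : List Int) (out : Int) : Prop := out = remove_minimum_number_of_elements_alt arr1 arr2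
instance (arr1 : List Int) (arr2 : List Int) (out : Int) : Decidable (Spec_remove_minimum_number_of_elements arr1 arr2 out) := by unfold Spec_remove_minimum_number_of_elements; infer_instance

-- ===== CLAIM (what is proved, stated in full; the proofs are below) =====
def Claim_equal_remove_minimum_number_of_elements : Prop := ∀ (arr1 : List Int) (arr2 : List Int), Dom_remove_minimum_number_of_elements arr1 arr2 → Spec_remove_minimum_number_of_elements arr1 arr2 (remove_minimum_number_of_elements arr1 arr2)

-- ===== LEMMAS AND PROOFS =====

-- A's summation loop as a mapped sum.
theorem foldl_if_add (L : List Int) (r : Int) (P : Int → Bool) (m : Int → Int) :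
    L.foldl (fun acc e => if P e then acc + m e else acc) r
      = r + (L.map fun e => if P e then m e else 0).sum := by
  induction L generalizing r with
  | nil => simp
  | cons x xs ih =>
    simp only [List.foldl_cons, List.map_cons, List.sum_cons, ih]
    by_cases h : P x
    · simp [h]; ring
    · simp [h]

-- B's consuming loop computes a sum of mins over any finite key set covering the list.
theorem b_loop (l : List Int) (d : PySem.Dict Int Int) (r : Int) (K : Finset Int)
    (hK : ∀ x ∈ l, x ∈ K) (hd : ∀ k, 0 ≤ d.getD k 0) :
    (l.foldl
      (fun (s : PySem.Dict Int Int × Int) x =>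
        if s.1.getD x 0 > 0 then (s.1.insert x (s.1.getD x 0 - 1), s.2 + 1) else s)
      (d, r)).2
      = r + ∑ k ∈ K, min (d.getD k 0) ((l.count k : Int)) := by
  induction l generalizing d r with
  | nil =>
    have h0 : ∀ k ∈ K, min (d.getD k 0) ((([] : List Int).count k : Int)) = 0 := by
      intro k _; have := hd k; simp; omega
    rw [List.foldl_nil, Finset.sum_congr rfl h0]
    simp
  | cons x xs ih =>
    have hxK : x ∈ K := hK x (by simp)
    have hK' : ∀ y ∈ xs, y ∈ K := fun y hy => hK y (by simp [hy])
    rw [List.foldl_cons]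
    by_cases h : d.getD x 0 > 0
    · have hd' : ∀ k, 0 ≤ (d.insert x (d.getD x 0 - 1)).getD k 0 := by
        intro k
        rw [PySem.Dict.getD_insert]
        split_ifs with hk
        · omega
        · exact hd k
      have hcond : (if (d, r).1.getD x 0 > 0
            then ((d, r).1.insert x ((d, r).1.getD x 0 - 1), (d, r).2 + 1) else (d, r))
          = (d.insert x (d.getD x 0 - 1), r + 1) := by simp [h]
      rw [hcond, ih _ _ hK' hd',
          ← Finset.add_sum_erase K _ hxK, ← Finset.add_sum_erase K _ hxK]
      have hS : ∑ k ∈ K.erase x, min ((d.insert x (d.getD x 0 - 1)).getD k 0) ((xs.count k : Int))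
          = ∑ k ∈ K.erase x, min (d.getD k 0) (((x :: xs).count k : Int)) := by
        apply Finset.sum_congr rfl
        intro k hk
        have hne : k ≠ x := Finset.ne_of_mem_erase hk
        rw [PySem.Dict.getD_insert, if_neg hne]
        simp [Ne.symm hne]
      have hx : min (d.getD x 0) (((x :: xs).count x : Int))
          = 1 + min ((d.insert x (d.getD x 0 - 1)).getD x 0) ((xs.count x : Int)) := by
        rw [PySem.Dict.getD_insert, if_pos rfl]
        simp only [List.count_cons, BEq.rfl, if_pos]
        push_cast
        omega
      rw [hS, hx]
      ring
    · have hcond : (if (d, r).1.getD x 0 > 0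
            then ((d, r).1.insert x ((d, r).1.getD x 0 - 1), (d, r).2 + 1) else (d, r))
          = (d, r) := by simp [h]
      rw [hcond, ih _ _ hK' hd]
      have hS : ∑ k ∈ K, min (d.getD k 0) ((xs.count k : Int))
          = ∑ k ∈ K, min (d.getD k 0) (((x :: xs).count k : Int)) := by
        apply Finset.sum_congr rfl
        intro k _
        by_cases hk : k = x
        · subst hk
          have h0 := hd k
          simp only [List.count_cons, BEq.rfl, if_pos]
          push_cast
          omega
        · simp [Ne.symm hk]
      rw [hS]

-- both sums of mins agree whether indexed by arr1's or arr2's support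
theorem sum_min_support (arr1 arr2 : List Int) :
    (∑ k ∈ arr1.toFinset, min ((arr1.count k : Int)) ((arr2.count k : Int)))
      = ∑ k ∈ arr2.toFinset, min ((arr1.count k : Int)) ((arr2.count k : Int)) := by
  have h1 : (∑ k ∈ arr1.toFinset, min ((arr1.count k : Int)) ((arr2.count k : Int)))
      = ∑ k ∈ arr1.toFinset ∪ arr2.toFinset, min ((arr1.count k : Int)) ((arr2.count k : Int)) := by
    apply Finset.sum_subset Finset.subset_union_left
    intro k _ hk
    have h0 : arr1.count k = 0 := List.count_eq_zero.mpr (by simpa using hk)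
    simp only [h0, Nat.cast_zero]
    exact min_eq_left (by positivity)
  have h2 : (∑ k ∈ arr2.toFinset, min ((arr1.count k : Int)) ((arr2.count k : Int)))
      = ∑ k ∈ arr1.toFinset ∪ arr2.toFinset, min ((arr1.count k : Int)) ((arr2.count k : Int)) := by
    apply Finset.sum_subset Finset.subset_union_right
    intro k _ hk
    have h0 : arr2.count k = 0 := List.count_eq_zero.mpr (by simpa using hk)
    simp only [h0, Nat.cast_zero]
    exact min_eq_right (by positivity)
  rw [h1, h2]

-- ===== VERDICT (by name: the statement is the Claim_ definition above) =====
theorem remove_minimum_number_of_elements_spec : Claim_equal_remove_minimum_number_of_elements := by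
  intro arr1 arr2 _
  unfold Spec_remove_minimum_number_of_elements
  simp only [remove_minimum_number_of_elements, remove_minimum_number_of_elements_alt,
    PySem.Dict.foldl_insert_getD_add_one_eq_counter]
  rw [b_loop arr2 (PySem.Dict.counter arr1) 0 arr2.toFinset
        (fun x hx => List.mem_toFinset.mpr hx)
        (fun k => by rw [PySem.Dict.getD_counter]; positivity)]
  rw [PySem.Dict.keys_counter, ← PySem.List.dedup_eq_ofList, foldl_if_add,
      ← List.sum_toFinset _ (PySem.List.nodup_dedup arr1)]
  have hfs : (PySem.List.dedup arr1).toFinset = arr1.toFinset := by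
    ext k; simp
  rw [hfs, zero_add, zero_add]
  have hcongr : ∀ k ∈ arr1.toFinset,
      (if (PySem.Dict.counter arr2).contains k then
          min ((PySem.Dict.counter arr1).getD k 0) ((PySem.Dict.counter arr2).getD k 0)
        else 0)
        = min ((arr1.count k : Int)) ((arr2.count k : Int)) := by
    intro k _
    by_cases h : (PySem.Dict.counter arr2).contains k = true
    · rw [if_pos h, PySem.Dict.getD_counter, PySem.Dict.getD_counter]
    · rw [if_neg h]
      have hk : k ∉ arr2 := by
        intro hkm
        exact h (by simpa [PySem.Dict.contains_counter] using hkm)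
      have h2 : arr2.count k = 0 := List.count_eq_zero.mpr hk
      have h1 : (0 : Int) ≤ (arr1.count k : Int) := by positivity
      simp [h2]
  have hB : ∀ k ∈ arr2.toFinset,
      min ((PySem.Dict.counter arr1).getD k 0) ((arr2.count k : Int))
        = min ((arr1.count k : Int)) ((arr2.count k : Int)) := by
    intro k _
    rw [PySem.Dict.getD_counter]
  rw [Finset.sum_congr rfl hcongr, sum_min_support, Finset.sum_congr rfl hB]
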